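-- pv_equiv track=rewrite | github.com/leynos/stilyagi | stilyagi/acronym_allowlist.py | _find_insertion_index
-- ===== SOURCE A (Python) =====
-- ROMAN_MARKER = "// Roman numerals appearing in API names"
--
-- class AcronymAllowlistError(RuntimeError):
--     """Raised when project acronyms cannot be parsed."""
--
-- def _find_insertion_index(lines: list[str]) -> int:
--     for idx, line in enumerate(lines):
--         if line.strip() == ROMAN_MARKER:
--             return idx
--     for idx, line in enumerate(lines):
--         if line.strip() == "}":
--             return idx
--     msg = "Unable to locate the allow map closing brace for insertion."
--     raise AcronymAllowlistError(msg)
-- ===== SOURCE B (Python) =====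
-- ROMAN_MARKER = "// Roman numerals appearing in API names"
--
-- class AcronymAllowlistError(RuntimeError):
--     """Raised when project acronyms cannot be parsed."""
--
-- def _find_insertion_index(lines: list[str]) -> int:
--     brace = None
--     for idx, line in enumerate(lines):
--         stripped = line.strip()
--         if stripped == ROMAN_MARKER:
--             return idx
--         if stripped == "}" and brace is None:
--             brace = idx
--     if brace is not None:
--         return brace
--     msg = "Unable to locate the allow map closing brace for insertion."
--     raise AcronymAllowlistError(msg)
-- ===== Notes on version B (the rewrite author's own statement) =====
-- stated objective: alternative
-- what changed: Replaced A's two sequential full scans (marker scan, then brace scan) with a single enumerate pass that returns on the marker and records the first closing-brace index as a candidate.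
import Mathlib
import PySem

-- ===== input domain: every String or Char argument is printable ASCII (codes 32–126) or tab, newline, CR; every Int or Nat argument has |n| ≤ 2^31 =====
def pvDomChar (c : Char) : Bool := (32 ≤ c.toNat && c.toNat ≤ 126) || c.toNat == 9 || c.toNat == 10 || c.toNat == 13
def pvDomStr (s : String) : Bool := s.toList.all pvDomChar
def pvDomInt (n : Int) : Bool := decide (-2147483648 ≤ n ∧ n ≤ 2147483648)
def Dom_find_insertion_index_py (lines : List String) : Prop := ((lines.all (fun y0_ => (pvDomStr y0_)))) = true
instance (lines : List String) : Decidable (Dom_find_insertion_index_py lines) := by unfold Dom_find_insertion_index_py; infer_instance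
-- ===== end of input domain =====

-- ===== PORT A =====
-- B collapses A's two sequential scans into one pass holding a candidate brace index (objective: alternative).
def pvRomanMarker : String := "// Roman numerals appearing in API names"

-- first scan of A: first index whose stripped line equals the marker
def pvScanMarker : List String → Int → Option Int
  | [], _ => none
  | l :: ls, i => if PySem.Str.strip l = pvRomanMarker then some i else pvScanMarker ls (i + 1)

-- second scan of A: first index whose stripped line equals "}"
def pvScanBrace : List String → Int → Option Int
  | [], _ => none
  | l :: ls, i => if PySem.Str.strip l = "}" then some i else pvScanBrace ls (i + 1)

-- the raise at the end is excluded by Pre_; the port returns 0 there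
def find_insertion_index_py (lines : List String) : Int :=
  match pvScanMarker lines 0 with
  | some k => k
  | none =>
    match pvScanBrace lines 0 with
    | some k => k
    | none => 0

-- ===== PORT B =====
-- single pass: return on marker, record first brace index in `brace`
def pvScanOnce : List String → Int → Option Int → Int
  | [], _, brace => match brace with | some b => b | none => 0
  | l :: ls, i, brace =>
    let stripped := PySem.Str.strip l
    if stripped = pvRomanMarker then i
    else if stripped = "}" ∧ brace = none then pvScanOnce ls (i + 1) (some i)
    else pvScanOnce ls (i + 1) brace

def find_insertion_index_py_alt (lines : List String) : Int :=
  pvScanOnce lines 0 none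

-- ===== PRECONDITION & SPEC =====
-- Pre_ excludes exactly the inputs on which Python A raises AcronymAllowlistError: no line strips to the marker or to "}".
def Pre_find_insertion_index_py (lines : List String) : Prop :=
  (∃ l ∈ lines, PySem.Str.strip l = pvRomanMarker) ∨ (∃ l ∈ lines, PySem.Str.strip l = "}")
instance (lines : List String) : Decidable (Pre_find_insertion_index_py lines) := by
  unfold Pre_find_insertion_index_py; infer_instance
def pvWitness_find_insertion_index_py : List String := ["map {", "  A: 1", "}"]
def Spec_find_insertion_index_py (lines : List String) (out : Int) : Prop := out = find_insertion_index_py_alt lines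
instance (lines : List String) (out : Int) : Decidable (Spec_find_insertion_index_py lines out) := by unfold Spec_find_insertion_index_py; infer_instance

-- ===== CLAIM (what is proved, stated in full; the proofs are below) =====
def Claim_equal_find_insertion_index_py : Prop := ∀ (lines : List String), Dom_find_insertion_index_py lines → Pre_find_insertion_index_py lines → Spec_find_insertion_index_py lines (find_insertion_index_py lines)

-- ===== LEMMAS AND PROOFS =====

-- the single pass equals: marker scan first, else the recorded brace, else the brace scan from here
theorem pvScanOnce_eq (lines : List String) : ∀ (i : Int) (brace : Option Int),
    pvScanOnce lines i brace =
      match pvScanMarker lines i with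
      | some k => k
      | none =>
        match brace with
        | some b => b
        | none => match pvScanBrace lines i with | some k => k | none => 0 := by
  induction lines with
  | nil => intro i brace; cases brace <;> simp [pvScanOnce, pvScanMarker, pvScanBrace]
  | cons l ls ih =>
    intro i brace
    by_cases hm : PySem.Str.strip l = pvRomanMarker
    · simp [pvScanOnce, pvScanMarker, hm]
    · by_cases hb : PySem.Str.strip l = "}"
      · have hne : ("}" : String) ≠ pvRomanMarker := by decide
        cases brace with
        | none =>
          simp [pvScanOnce, pvScanMarker, pvScanBrace, hb, hne, ih]
        | some b =>
          simp [pvScanOnce, pvScanMarker, hb, hne, ih]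
      · cases brace <;> simp [pvScanOnce, pvScanMarker, pvScanBrace, hm, hb, ih]

-- ===== VERDICT (by name: the statement is the Claim_ definition above) =====
theorem find_insertion_index_py_spec : Claim_equal_find_insertion_index_py := by
  intro lines _ _
  unfold Spec_find_insertion_index_py find_insertion_index_py find_insertion_index_py_alt
  rw [pvScanOnce_eq]
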